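-- pv_equiv track=rewrite | github.com/rauszroli/teach-rajk-prog1-2020a | members/Dani/04.17/9_kurzus_hazi.py | most_a_letters_solution
-- ===== SOURCE A (Python) =====
-- def most_a_letters_solution(list_of_words):
--     count = 0
--     a = []
--     for word in list_of_words:
--         for letter in word:
--             if letter == "a" or letter == "A":
--                 count += 1
--         a.append(count)
--         count=0
--     legnagyobb = max(a)
--     if legnagyobb == 0:
--         return -1
--     else:
--         return a.index(legnagyobb)
-- ===== SOURCE B (Python) =====
-- def most_a_letters_solution(list_of_words):
--     ranking = sorted(range(len(list_of_words)),
--                      key=lambda i: -(list_of_words[i].count("a") + list_of_words[i].count("A")))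
--     winner = ranking[0]
--     if list_of_words[winner].count("a") + list_of_words[winner].count("A") == 0:
--         return -1
--     return winner
-- ===== Notes on version B (the rewrite author's own statement) =====
-- stated objective: alternative
-- what changed: B ranks the indices with a stable sort by descending 'a'/'A' count (counted via str.count, not a character loop) and reads the winner off the head of the ranking, instead of A's per-word count list followed by max() and list.index(); Pre_ excludes only the empty list, where A's max([]) raises ValueError (and B's ranking[0] raises IndexError).
-- outside the precondition, e.g. on most_a_letters_solution([]): A raises ValueError, B raises IndexError
import Mathlib
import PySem

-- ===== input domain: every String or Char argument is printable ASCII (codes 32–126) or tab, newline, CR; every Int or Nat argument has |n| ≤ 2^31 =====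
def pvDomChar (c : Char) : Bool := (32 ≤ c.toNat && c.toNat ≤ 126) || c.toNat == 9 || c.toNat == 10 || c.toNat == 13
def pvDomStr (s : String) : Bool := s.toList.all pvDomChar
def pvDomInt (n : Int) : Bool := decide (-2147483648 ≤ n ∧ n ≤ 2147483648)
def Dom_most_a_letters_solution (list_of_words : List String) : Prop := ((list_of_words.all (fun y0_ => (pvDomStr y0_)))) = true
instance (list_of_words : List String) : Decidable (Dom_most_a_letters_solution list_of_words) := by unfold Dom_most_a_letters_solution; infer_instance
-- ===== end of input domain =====

-- B ranks the indices by a stable sort on descending 'a'/'A' count (str.count) and takes the head, instead of A's count list + max() + list.index(); return values agree on nonempty lists (both raise on []).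


-- ===== PORT A =====
-- inner loop of A: count = 0; for letter in word: if letter == "a" or letter == "A": count += 1
def pvCntA (word : String) : Int :=
  word.toList.foldl (fun count letter => if letter = 'a' ∨ letter = 'A' then count + 1 else count) 0

def most_a_letters_solution (list_of_words : List String) : Int :=
  let a : List Int := list_of_words.foldl (fun a word => a ++ [pvCntA word]) []
  match PySem.List.max? a (fun y => y) with
  | none => 0  -- unreachable under Pre_: Python's max([]) raises ValueError
  | some legnagyobb =>
    if legnagyobb = 0 then -1
    else
      match PySem.List.index? a legnagyobb with
      | none => 0  -- unreachable: legnagyobb ∈ a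
      | some i => (i : Int)

-- ===== PORT B =====
-- word.count("a") + word.count("A")
def pvCntB (word : String) : Int :=
  (PySem.Str.count word "a" : Int) + (PySem.Str.count word "A" : Int)

def most_a_letters_solution_alt (list_of_words : List String) : Int :=
  let key : Int → Int := fun i => -(pvCntB (PySem.List.pyGetD list_of_words i ""))
  match PySem.List.sorted (PySem.List.pyRange 0 (PySem.List.len list_of_words) 1) key with
  | [] => 0  -- unreachable under Pre_: Python's ranking[0] raises IndexError on []
  | winner :: _ =>
    if pvCntB (PySem.List.pyGetD list_of_words winner "") = 0 then -1 else winner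

-- ===== PRECONDITION & SPEC =====
-- Pre_ excludes only the empty list, on which A's max([]) raises ValueError (B's ranking[0] raises IndexError).
def Pre_most_a_letters_solution (list_of_words : List String) : Prop := list_of_words ≠ []
instance (list_of_words : List String) : Decidable (Pre_most_a_letters_solution list_of_words) := by unfold Pre_most_a_letters_solution; infer_instance
def pvWitness_most_a_letters_solution : List String := (["banana", "Ok"])

def Spec_most_a_letters_solution (list_of_words : List String) (out : Int) : Prop := out = most_a_letters_solution_alt list_of_words
instance (list_of_words : List String) (out : Int) : Decidable (Spec_most_a_letters_solution list_of_words out) := by unfold Spec_most_a_letters_solution; infer_instance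

-- ===== CLAIM (what is proved, stated in full; the proofs are below) =====
def Claim_equal_most_a_letters_solution : Prop := ∀ (list_of_words : List String), Dom_most_a_letters_solution list_of_words → Pre_most_a_letters_solution list_of_words → Spec_most_a_letters_solution list_of_words (most_a_letters_solution list_of_words)

-- ===== LEMMAS AND PROOFS =====

-- reference: first maximum (index, value) of an Int list, by right recursion
def pvBest : List Int → Option (Nat × Int)
  | [] => none
  | x :: t =>
    match pvBest t with
    | none => some (0, x)
    | some (i, m) => if m ≤ x then some (0, x) else some (i + 1, m)

-- single-character substring count is character count
theorem pvCount_go_single (c : Char) (fuel : Nat) (l : List Char) (acc : Nat)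
    (h : l.length ≤ fuel) :
    PySem.Chars.count.go [c] fuel l acc = acc + l.count c := by
  induction fuel generalizing l acc with
  | zero =>
    match l with
    | [] => simp [PySem.Chars.count.go]
    | x :: t => simp at h
  | succ n ih =>
    match l with
    | [] => simp [PySem.Chars.count.go]
    | x :: t =>
      simp only [PySem.Chars.count.go]
      have hpre : List.isPrefixOf [c] (x :: t) = (c == x) := by
        simp [List.isPrefixOf]
      rw [hpre]
      simp only [List.length_cons] at h
      by_cases hc : c = x
      · subst hc
        simp only [beq_self_eq_true, if_true]
        rw [show List.drop [c].length (c :: t) = t by simp,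
            ih t (acc + 1) (by omega)]
        simp [List.count_cons]
        omega
      · have hbe : (c == x) = false := by simp [hc]
        rw [hbe]
        simp only [Bool.false_eq_true, if_false]
        rw [ih t acc (by omega)]
        have : ¬ x = c := fun hx => hc hx.symm
        simp [List.count_cons, this]

theorem pvCount_single (s : String) (c : Char) :
    PySem.Chars.count s.toList [c] = s.toList.count c := by
  simp only [PySem.Chars.count]
  simp only [List.isEmpty_cons, Bool.false_eq_true, if_false]
  rw [pvCount_go_single c s.toList.length s.toList 0 (le_refl _)]
  omega

theorem pvCntFoldA_count (cs : List Char) (a : Int) :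
    cs.foldl (fun count letter => if letter = 'a' ∨ letter = 'A' then count + 1 else count) a
      = a + cs.count 'a' + cs.count 'A' := by
  induction cs generalizing a with
  | nil => simp
  | cons x t ih =>
    simp only [List.foldl_cons, List.count_cons]
    rw [ih]
    by_cases h : x = 'a' ∨ x = 'A'
    · rcases h with h | h <;> subst h <;> simp <;> push_cast <;> ring
    · have h1 : x ≠ 'a' := fun hx => h (Or.inl hx)
      have h2 : x ≠ 'A' := fun hx => h (Or.inr hx)
      have h1' : ¬ 'a' = x := fun hx => h1 hx.symm
      have h2' : ¬ 'A' = x := fun hx => h2 hx.symm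
      simp [h1, h2]

theorem pvCntB_eq (w : String) : pvCntB w = pvCntA w := by
  unfold pvCntB pvCntA
  rw [pvCntFoldA_count]
  rw [PySem.Str.count_eq, PySem.Str.count_eq]
  have ha : ("a" : String).toList = ['a'] := by decide
  have hA : ("A" : String).toList = ['A'] := by decide
  rw [ha, hA, pvCount_single, pvCount_single]
  push_cast
  ring

theorem pvBest_none_iff (l : List Int) : pvBest l = none ↔ l = [] := by
  cases l with
  | nil => simp [pvBest]
  | cons x t =>
    simp only [pvBest]
    cases h : pvBest t with
    | none => simp
    | some p => cases p with | mk i m => by_cases hm : m ≤ x <;> simp [hm]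

theorem pvBest_le (l : List Int) (i : Nat) (m : Int) (h : pvBest l = some (i, m)) :
    ∀ x ∈ l, x ≤ m := by
  induction l generalizing i m with
  | nil => simp [pvBest] at h
  | cons x t ih =>
    simp only [pvBest] at h
    cases ht : pvBest t with
    | none =>
      rw [ht] at h
      have ht' := (pvBest_none_iff t).mp ht
      simp at h
      simp [ht', ← h.2]
    | some p =>
      cases p with | mk j mt =>
      rw [ht] at h
      by_cases hm : mt ≤ x
      · simp [hm] at h
        intro y hy
        rcases List.mem_cons.mp hy with rfl | hy
        · omega
        · have := ih j mt ht y hy; omega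
      · simp [hm] at h
        intro y hy
        rcases List.mem_cons.mp hy with rfl | hy
        · omega
        · have := ih j mt ht y hy; omega

theorem pvBest_mem (l : List Int) (i : Nat) (m : Int) (h : pvBest l = some (i, m)) :
    m ∈ l := by
  induction l generalizing i m with
  | nil => simp [pvBest] at h
  | cons x t ih =>
    simp only [pvBest] at h
    cases ht : pvBest t with
    | none =>
      rw [ht] at h
      simp at h
      simp [← h.2]
    | some p =>
      cases p with | mk j mt =>
      rw [ht] at h
      by_cases hm : mt ≤ x
      · simp [hm] at h
        simp [← h.2]
      · simp [hm] at h
        exact List.mem_cons_of_mem x (h.2 ▸ ih j mt ht)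

theorem pvBest_max? (l : List Int) (i : Nat) (m : Int) (h : pvBest l = some (i, m)) :
    PySem.List.max? l (fun y => y) = some m := by
  cases hm' : PySem.List.max? l (fun y => y) with
  | none =>
    rw [PySem.List.max?_eq_none_iff] at hm'
    rw [hm'] at h
    simp [pvBest] at h
  | some m' =>
    have h1 := PySem.List.max?_isMax hm'
    have h2 := PySem.List.max?_mem hm'
    have h3 : m' ≤ m := pvBest_le l i m h m' h2
    have h4 : m ≤ m' := h1 m (pvBest_mem l i m h)
    exact congrArg some (le_antisymm h3 h4)

theorem pvBest_index (l : List Int) (i : Nat) (m : Int) (h : pvBest l = some (i, m)) :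
    PySem.List.index? l m = some i := by
  induction l generalizing i m with
  | nil => simp [pvBest] at h
  | cons x t ih =>
    simp only [pvBest] at h
    cases ht : pvBest t with
    | none =>
      rw [ht] at h
      simp at h
      rw [← h.1, ← h.2]
      exact PySem.List.index?_cons_self x t
    | some p =>
      cases p with | mk j mt =>
      rw [ht] at h
      by_cases hm : mt ≤ x
      · simp [hm] at h
        rw [← h.1, ← h.2]
        exact PySem.List.index?_cons_self x t
      · simp [hm] at h
        have hne : x ≠ m := by omega
        obtain ⟨hi, hm2⟩ := h
        rw [PySem.List.index?_cons_of_ne t hne, ← hm2, ih j mt ht]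
        simp [← hi]

-- head of an insertion (insertBy with a strict key comparison)
theorem pvHead_insertBy (key : Int → Int) (x h : Int) (r : List Int) :
    (PySem.List.insertBy (fun a b => decide (key a < key b)) x (h :: r)).head?
      = some (if key x < key h then x else h) := by
  simp only [PySem.List.insertBy]
  by_cases hx : key x < key h <;> simp [hx]

theorem pvHead_foldl_insertBy (key : Int → Int) (t : List Int) (acc : List Int) (h0 : Int)
    (hacc : acc.head? = some h0) :
    (t.foldl (fun acc x => PySem.List.insertBy (fun a b => decide (key a < key b)) x acc) acc).head?
      = some (t.foldl (fun h x => if key x < key h then x else h) h0) := by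
  induction t generalizing acc h0 with
  | nil => simpa
  | cons x t ih =>
    simp only [List.foldl_cons]
    match acc, hacc with
    | h :: r, hacc =>
      simp only [List.head?_cons, Option.some.injEq] at hacc
      subst hacc
      exact ih _ _ (pvHead_insertBy key x h r)

-- the running first strict minimum over consecutive indices, characterised by pvBest of the key values
theorem pvFoldMin (cs : List Int) (key : Int → Int) (s h0 : Int)
    (hk : ∀ (k : Nat) (h : k < cs.length), key (s + k) = - cs[k]) :
    (PySem.List.pyRange s (s + cs.length) 1).foldl
        (fun h x => if key x < key h then x else h) h0
      = match pvBest cs with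
        | none => h0
        | some (i, m) => if -m < key h0 then s + i else h0 := by
  induction cs generalizing s h0 with
  | nil => simp [pvBest, PySem.List.pyRange]
  | cons c t ih =>
    rw [show (s + ((c :: t).length : Int)) = s + (1 + t.length) by push_cast [List.length_cons]; ring]
    rw [show s + (1 + (t.length : Int)) = (s + 1) + t.length by ring]
    rw [PySem.List.pyRange_one_cons (by omega : s < (s+1) + (t.length : Int))]
    simp only [List.foldl_cons]
    have hk0 : key s = -c := by simpa using hk 0 (by simp)
    have hk' : ∀ (k : Nat) (h : k < t.length), key ((s + 1) + k) = - t[k] := by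
      intro k h
      have := hk (k + 1) (by simp; omega)
      simpa [add_assoc, add_comm, add_left_comm] using this
    rw [ih (s + 1) _ hk']
    simp only [pvBest]
    cases ht : pvBest t with
    | none =>
      by_cases hc : key s < key h0 <;> simp [hc, hk0] at * <;> simp [hc, hk0] <;> omega
    | some p =>
      cases p with | mk j mt =>
      by_cases hc : key s < key h0
      · -- h1 = s, key s = -c
        rw [if_pos hc]
        by_cases h1 : mt ≤ c
        · -- best is (0, c); fold keeps s since -mt < key s ↔ c < mt is false
          have h2 : ¬ (-mt < key s) := by rw [hk0]; omega
          have h3 : -c < key h0 := by rw [hk0] at hc; omega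
          simp [h1, h2, h3]
        · have h2 : -mt < key s := by rw [hk0]; omega
          have h3 : -mt < key h0 := by rw [hk0] at hc; omega
          simp only [if_pos h2, if_neg h1, if_pos h3]
          push_cast
          ring
      · rw [if_neg hc]
        by_cases h1 : mt ≤ c
        · have h3 : (¬ -c < key h0) := by rw [hk0] at hc; omega
          by_cases h4 : -mt < key h0
          · have : False := by rw [hk0] at hc; omega
            exact this.elim
          · simp [h1, h4, h3]
        · by_cases h4 : -mt < key h0
          · simp only [if_pos h4, if_neg h1, if_pos h4]
            push_cast
            ring
          · simp [h1, h4]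

-- pvBest's index points at its value
theorem pvBest_getElem (l : List Int) (i : Nat) (m : Int) (h : pvBest l = some (i, m)) :
    ∃ (hk : i < l.length), l[i] = m := by
  have hidx := pvBest_index l i m h
  obtain ⟨hk, hv, _⟩ := PySem.List.getElem_of_index?_eq_some hidx
  exact ⟨hk, hv⟩

-- ===== VERDICT (by name: the statement is the Claim_ definition above) =====
theorem most_a_letters_solution_spec : Claim_equal_most_a_letters_solution := by
  intro ws _ hpre
  unfold Spec_most_a_letters_solution most_a_letters_solution most_a_letters_solution_alt
  rw [PySem.List.foldl_append_singleton_eq_map]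
  simp only [List.nil_append]
  cases ws with
  | nil => exact absurd rfl hpre
  | cons w t =>
    cases hb : pvBest ((w :: t).map pvCntA) with
    | none => simp [pvBest_none_iff] at hb
    | some p =>
      cases p with | mk i m =>
      rw [pvBest_max? _ _ _ hb]
      have hidx := pvBest_index _ _ _ hb
      dsimp only
      rw [hidx]
      dsimp only
      -- B's side
      set key : Int → Int := fun j => -(pvCntB (PySem.List.pyGetD (w :: t) j "")) with hkey
      have hkey0 : key 0 = -(pvCntA w) := by
        rw [hkey]
        simp [PySem.List.pyGetD_zero_cons, pvCntB_eq]
      have hk : ∀ (k : Nat) (h : k < (t.map pvCntA).length), key ((1:Int) + k) = - (t.map pvCntA)[k] := by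
        intro k hkk
        have hkk' : k < t.length := by simpa using hkk
        have h1 : ((1:Int) + k) = ((k + 1 : Nat) : Int) := by push_cast; ring
        rw [hkey]
        simp only [h1, PySem.List.pyGetD_natCast]
        rw [List.getD_eq_getElem _ _ (by simp; omega)]
        simp [pvCntB_eq]
      have hrange : PySem.List.pyRange 0 (PySem.List.len (w :: t)) 1
          = 0 :: PySem.List.pyRange 1 ((1:Int) + ((t.map pvCntA).length : Int)) 1 := by
        have hl : PySem.List.len (w :: t) = (1:Int) + ((t.map pvCntA).length : Int) := by
          rw [PySem.List.len_eq]
          push_cast [List.length_cons, List.length_map]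
          ring
        rw [hl, PySem.List.pyRange_one_cons (by push_cast; omega)]
        norm_num
      have hhead : (PySem.List.sorted (PySem.List.pyRange 0 (PySem.List.len (w :: t)) 1) key).head?
          = some (match pvBest (t.map pvCntA) with
                  | none => 0
                  | some (j, mt) => if -mt < key 0 then 1 + (j : Int) else 0) := by
        rw [hrange, PySem.List.sorted_eq_foldl_insertBy, List.foldl_cons]
        have hins : PySem.List.insertBy (fun a b => decide (key a < key b)) 0 ([] : List Int) = [0] := by
          simp [PySem.List.insertBy]
        rw [hins, pvHead_foldl_insertBy key _ [0] 0 rfl]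
        rw [pvFoldMin (t.map pvCntA) key 1 0 hk]
      cases hs : PySem.List.sorted (PySem.List.pyRange 0 (PySem.List.len (w :: t)) 1) key with
      | nil =>
        rw [hs] at hhead
        simp at hhead
      | cons winner rest =>
        rw [hs] at hhead
        simp only [List.head?_cons, Option.some.injEq] at hhead
        cases ht : pvBest (t.map pvCntA) with
        | none =>
          have ht0 : t.map pvCntA = [] := (pvBest_none_iff _).mp ht
          have ht' : t = [] := by simpa using ht0
          subst ht'
          rw [ht] at hhead
          dsimp only at hhead
          simp only [List.map_cons, List.map_nil, pvBest] at hb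
          have hi : i = 0 := by
            have := hb
            simp at this
            omega
          have hm : m = pvCntA w := by
            have := hb
            simp at this
            omega
          subst hi; subst hm
          rw [hhead]
          simp [PySem.List.pyGetD_zero_cons, pvCntB_eq]
        | some q =>
          cases q with | mk j mt =>
          rw [ht] at hhead
          dsimp only at hhead
          simp only [List.map_cons, pvBest, ht] at hb
          by_cases hcmp : mt ≤ pvCntA w
          · rw [if_pos hcmp] at hb
            simp only [Option.some.injEq, Prod.mk.injEq] at hb
            obtain ⟨hi, hm⟩ := hb
            have hlt : ¬ (-mt < key 0) := by rw [hkey0]; omega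
            rw [if_neg hlt] at hhead
            rw [hhead]
            dsimp only
            rw [show PySem.List.pyGetD (w :: t) 0 "" = w from PySem.List.pyGetD_zero_cons w t ""]
            rw [pvCntB_eq, ← hm, ← hi]
            norm_num
          · rw [if_neg hcmp] at hb
            simp only [Option.some.injEq, Prod.mk.injEq] at hb
            obtain ⟨hi, hm⟩ := hb
            have hlt : -mt < key 0 := by rw [hkey0]; omega
            rw [if_pos hlt] at hhead
            rw [hhead]
            obtain ⟨hj, hv⟩ := pvBest_getElem _ _ _ ht
            have hkj := hk j hj
            have hcw : pvCntB (PySem.List.pyGetD (w :: t) ((1:Int) + j) "") = mt := by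
              have h' : key ((1:Int) + j) = -mt := by rw [hkj, hv]
              have h'' : -pvCntB (PySem.List.pyGetD (w :: t) ((1:Int) + j) "") = -mt := h'
              omega
            dsimp only
            rw [hcw, ← hm, ← hi]
            by_cases hz : mt = 0
            · simp [hz]
            · simp only [if_neg hz]
              push_cast
              ring
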